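-- pv_equiv track=rewrite | github.com/Saikushal185/SDP_Test | publication_visualizations.py | get_feature_groups
-- ===== SOURCE A (Python) =====
-- def get_feature_groups(columns):
--     """Categorize features into clinical speech feature groups."""
--     groups = {
--         'Jitter': [c for c in columns if 'jitter' in c.lower() or
--                    c.lower().startswith('jitter')],
--         'Shimmer': [c for c in columns if 'shimmer' in c.lower() or
--                     c.lower().startswith('shimmer')],
--         'Nonlinear Dynamics': [c for c in columns if any(x in c.upper()
--                                for x in ['DFA', 'RPDE', 'PPE', 'D2', 'ENTROPY'])],
--         'Wavelet/TQWT': [c for c in columns if any(x in c.lower()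
--                          for x in ['tqwt', 'wavelet', 'mfcc', 'delta'])]
--     }
--     return groups
-- ===== SOURCE B (Python) =====
-- KEYWORD_RULES = [
--     ('jitter', False, 'Jitter'),
--     ('shimmer', False, 'Shimmer'),
--     ('DFA', True, 'Nonlinear Dynamics'),
--     ('RPDE', True, 'Nonlinear Dynamics'),
--     ('PPE', True, 'Nonlinear Dynamics'),
--     ('D2', True, 'Nonlinear Dynamics'),
--     ('ENTROPY', True, 'Nonlinear Dynamics'),
--     ('tqwt', False, 'Wavelet/TQWT'),
--     ('wavelet', False, 'Wavelet/TQWT'),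
--     ('mfcc', False, 'Wavelet/TQWT'),
--     ('delta', False, 'Wavelet/TQWT'),
-- ]
--
-- def get_feature_groups(columns):
--     """Categorize features via an inverted keyword->group rule table (single pass)."""
--     groups = {'Jitter': [], 'Shimmer': [], 'Nonlinear Dynamics': [],
--               'Wavelet/TQWT': []}
--     for c in columns:
--         lc, uc = c.lower(), c.upper()
--         seen = set()
--         for needle, use_upper, group in KEYWORD_RULES:
--             if group not in seen and needle in (uc if use_upper else lc):
--                 seen.add(group)
--                 groups[group].append(c)
--     return groups
-- ===== Notes on version B (the rewrite author's own statement) =====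
-- stated objective: faster
-- what changed: Replaced A's four hardcoded list-comprehension passes with a data-driven inverted keyword->group rule table interpreted in a single pass over columns (one lower()/upper() per column instead of five lower()+one upper()), using a per-column seen-set to append each column at most once per group and a dict-of-lists accumulator; the redundant startswith test, implied by substring membership, disappears.
import Mathlib
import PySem

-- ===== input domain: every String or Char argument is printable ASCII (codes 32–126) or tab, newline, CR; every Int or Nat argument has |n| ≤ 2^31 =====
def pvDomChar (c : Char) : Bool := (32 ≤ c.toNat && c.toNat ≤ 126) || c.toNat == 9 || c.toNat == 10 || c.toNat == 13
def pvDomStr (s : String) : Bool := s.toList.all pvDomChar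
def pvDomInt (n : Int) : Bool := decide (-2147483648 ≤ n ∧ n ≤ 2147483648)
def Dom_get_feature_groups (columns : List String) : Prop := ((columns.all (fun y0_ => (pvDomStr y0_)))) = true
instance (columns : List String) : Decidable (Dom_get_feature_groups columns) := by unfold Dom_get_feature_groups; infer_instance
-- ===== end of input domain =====

-- B replaces A's four hardcoded comprehension passes by a data-driven inverted keyword→group
-- rule table interpreted in a single pass, with a per-column seen-set and a dict accumulator;
-- the return value is identical.

-- ===== PORT A =====
def get_feature_groups (columns : List String) : List (String × List String) :=
  [ ("Jitter", columns.filter (fun c =>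
      PySem.Str.isIn "jitter" (PySem.Str.lower c) ||
      PySem.Str.startswith (PySem.Str.lower c) "jitter")),
    ("Shimmer", columns.filter (fun c =>
      PySem.Str.isIn "shimmer" (PySem.Str.lower c) ||
      PySem.Str.startswith (PySem.Str.lower c) "shimmer")),
    ("Nonlinear Dynamics", columns.filter (fun c =>
      (["DFA", "RPDE", "PPE", "D2", "ENTROPY"].any (fun x =>
        PySem.Str.isIn x (PySem.Str.upper c))))),
    ("Wavelet/TQWT", columns.filter (fun c =>
      (["tqwt", "wavelet", "mfcc", "delta"].any (fun x =>
        PySem.Str.isIn x (PySem.Str.lower c))))) ]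

-- ===== PORT B =====
-- the module-level KEYWORD_RULES table of Source B
def pvRules : List (String × Bool × String) :=
  [ ("jitter", false, "Jitter"),
    ("shimmer", false, "Shimmer"),
    ("DFA", true, "Nonlinear Dynamics"),
    ("RPDE", true, "Nonlinear Dynamics"),
    ("PPE", true, "Nonlinear Dynamics"),
    ("D2", true, "Nonlinear Dynamics"),
    ("ENTROPY", true, "Nonlinear Dynamics"),
    ("tqwt", false, "Wavelet/TQWT"),
    ("wavelet", false, "Wavelet/TQWT"),
    ("mfcc", false, "Wavelet/TQWT"),
    ("delta", false, "Wavelet/TQWT") ]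

-- `needle in (uc if use_upper else lc)`
def pvMatch (lc uc : String) (r : String × Bool × String) : Bool :=
  PySem.Str.isIn r.1 (if r.2.1 then uc else lc)

-- the body of the inner rule loop of Source B
def pvStep (c lc uc : String) (st : PySem.Set String × PySem.Dict String (List String))
    (r : String × Bool × String) : PySem.Set String × PySem.Dict String (List String) :=
  if !(PySem.Set.contains st.1 r.2.2) && pvMatch lc uc r then
    (PySem.Set.add st.1 r.2.2, PySem.Dict.modify st.2 r.2.2 [] (· ++ [c]))
  else st

def get_feature_groups_alt (columns : List String) : List (String × List String) :=
  (columns.foldl (fun groups c =>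
      let lc := PySem.Str.lower c
      let uc := PySem.Str.upper c
      (pvRules.foldl (pvStep c lc uc) (PySem.Set.empty, groups)).2)
    (PySem.Dict.ofList
      [("Jitter", []), ("Shimmer", []), ("Nonlinear Dynamics", []), ("Wavelet/TQWT", [])])).items

-- ===== PRECONDITION & SPEC =====
def Spec_get_feature_groups (columns : List String) (out : List (String × List String)) : Prop := out = get_feature_groups_alt columns
instance (columns : List String) (out : List (String × List String)) : Decidable (Spec_get_feature_groups columns out) := by unfold Spec_get_feature_groups; infer_instance

-- ===== CLAIM (what is proved, stated in full; the proofs are below) =====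
def Claim_equal_get_feature_groups : Prop := ∀ (columns : List String), Dom_get_feature_groups columns → Spec_get_feature_groups columns (get_feature_groups columns)

-- ===== LEMMAS AND PROOFS =====

-- the four blocks of pvRules, and the conditional state updates they perform
def pvRsJ : List (String × Bool × String) := [("jitter", false, "Jitter")]
def pvRsS : List (String × Bool × String) := [("shimmer", false, "Shimmer")]
def pvRsN : List (String × Bool × String) :=
  [("DFA", true, "Nonlinear Dynamics"), ("RPDE", true, "Nonlinear Dynamics"),
   ("PPE", true, "Nonlinear Dynamics"), ("D2", true, "Nonlinear Dynamics"),
   ("ENTROPY", true, "Nonlinear Dynamics")]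
def pvRsW : List (String × Bool × String) :=
  [("tqwt", false, "Wavelet/TQWT"), ("wavelet", false, "Wavelet/TQWT"),
   ("mfcc", false, "Wavelet/TQWT"), ("delta", false, "Wavelet/TQWT")]

def pvCondAdd (b : Bool) (g : String) (s : PySem.Set String) : PySem.Set String :=
  if b then PySem.Set.add s g else s

def pvCondMod (c : String) (b : Bool) (g : String) (d : PySem.Dict String (List String)) :
    PySem.Dict String (List String) :=
  if b then d.modify g [] (· ++ [c]) else d

theorem pv_contains_add_ne (s : PySem.Set String) (x y : String) (h : y ≠ x) :
    PySem.Set.contains (PySem.Set.add s x) y = PySem.Set.contains s y := by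
  simp only [PySem.Set.add, PySem.Set.contains]
  split_ifs <;> simp [h]

-- once a group is in `seen`, every remaining rule of that group is skipped
theorem pv_fold_skip (c lc uc g : String) (rs : List (String × Bool × String))
    (h : ∀ r ∈ rs, r.2.2 = g) (seen : PySem.Set String)
    (groups : PySem.Dict String (List String))
    (hg : PySem.Set.contains seen g = true) :
    rs.foldl (pvStep c lc uc) (seen, groups) = (seen, groups) := by
  induction rs with
  | nil => rfl
  | cons r rest ih =>
    have hr : r.2.2 = g := h r (List.mem_cons_self)
    rw [List.foldl_cons]
    have hstep : pvStep c lc uc (seen, groups) r = (seen, groups) := by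
      simp [PySem.Set.contains] at hg
      simp [pvStep, PySem.Set.contains, hr, hg]
    rw [hstep]
    exact ih (fun r hrm => h r (List.mem_cons_of_mem _ hrm))

-- a contiguous block of rules of one group appends `c` once iff any needle matches
theorem pv_fold_block (c lc uc g : String) (rs : List (String × Bool × String))
    (h : ∀ r ∈ rs, r.2.2 = g) (seen : PySem.Set String)
    (groups : PySem.Dict String (List String))
    (hg : PySem.Set.contains seen g = false) :
    rs.foldl (pvStep c lc uc) (seen, groups) =
      (if rs.any (pvMatch lc uc) then
        (PySem.Set.add seen g, PySem.Dict.modify groups g [] (· ++ [c]))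
      else (seen, groups)) := by
  induction rs with
  | nil => rfl
  | cons r rest ih =>
    have hr : r.2.2 = g := h r (List.mem_cons_self)
    have hrest : ∀ r ∈ rest, r.2.2 = g := fun r hrm => h r (List.mem_cons_of_mem _ hrm)
    rw [List.foldl_cons]
    by_cases hm : pvMatch lc uc r = true
    · have hstep : pvStep c lc uc (seen, groups) r =
          (PySem.Set.add seen g, PySem.Dict.modify groups g [] (· ++ [c])) := by
        simp [PySem.Set.contains] at hg
        simp [pvStep, PySem.Set.contains, hr, hg, hm]
      rw [hstep]
      have hin : PySem.Set.contains (PySem.Set.add seen g) g = true := by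
        simp [PySem.Set.contains] at hg
        simp [PySem.Set.add, PySem.Set.contains, hg]
      rw [pv_fold_skip c lc uc g rest hrest _ _ hin]
      simp [List.any_cons, hm]
    · have hstep : pvStep c lc uc (seen, groups) r = (seen, groups) := by
        simp [pvStep, hm]
      have hm' : pvMatch lc uc r = false := by simpa using hm
      rw [hstep, ih hrest, List.any_cons, hm', Bool.false_or]

-- cascaded evaluation of the four blocks, for any seen-set missing the groups involved
theorem pv_fold_W (c lc uc : String) (seen : PySem.Set String)
    (groups : PySem.Dict String (List String))
    (hgW : PySem.Set.contains seen "Wavelet/TQWT" = false) :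
    pvRsW.foldl (pvStep c lc uc) (seen, groups) =
      (pvCondAdd (pvRsW.any (pvMatch lc uc)) "Wavelet/TQWT" seen,
       pvCondMod c (pvRsW.any (pvMatch lc uc)) "Wavelet/TQWT" groups) := by
  rw [pv_fold_block c lc uc "Wavelet/TQWT" pvRsW (by simp [pvRsW]) seen groups hgW]
  by_cases h : pvRsW.any (pvMatch lc uc) = true <;> simp [pvCondAdd, pvCondMod, h]

theorem pv_fold_NW (c lc uc : String) (seen : PySem.Set String)
    (groups : PySem.Dict String (List String))
    (hgN : PySem.Set.contains seen "Nonlinear Dynamics" = false)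
    (hgW : PySem.Set.contains seen "Wavelet/TQWT" = false) :
    (pvRsN ++ pvRsW).foldl (pvStep c lc uc) (seen, groups) =
      (pvCondAdd (pvRsW.any (pvMatch lc uc)) "Wavelet/TQWT"
        (pvCondAdd (pvRsN.any (pvMatch lc uc)) "Nonlinear Dynamics" seen),
       pvCondMod c (pvRsW.any (pvMatch lc uc)) "Wavelet/TQWT"
        (pvCondMod c (pvRsN.any (pvMatch lc uc)) "Nonlinear Dynamics" groups)) := by
  rw [List.foldl_append,
    pv_fold_block c lc uc "Nonlinear Dynamics" pvRsN (by simp [pvRsN]) seen groups hgN]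
  by_cases h : pvRsN.any (pvMatch lc uc) = true
  · rw [if_pos h, pv_fold_W c lc uc _ _ (by rw [pv_contains_add_ne _ _ _ (by decide)]; exact hgW)]
    simp [pvCondAdd, pvCondMod, h]
  · rw [if_neg h, pv_fold_W c lc uc _ _ hgW]
    simp [pvCondAdd, pvCondMod, h]

theorem pv_fold_SNW (c lc uc : String) (seen : PySem.Set String)
    (groups : PySem.Dict String (List String))
    (hgS : PySem.Set.contains seen "Shimmer" = false)
    (hgN : PySem.Set.contains seen "Nonlinear Dynamics" = false)
    (hgW : PySem.Set.contains seen "Wavelet/TQWT" = false) :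
    (pvRsS ++ (pvRsN ++ pvRsW)).foldl (pvStep c lc uc) (seen, groups) =
      (pvCondAdd (pvRsW.any (pvMatch lc uc)) "Wavelet/TQWT"
        (pvCondAdd (pvRsN.any (pvMatch lc uc)) "Nonlinear Dynamics"
          (pvCondAdd (pvRsS.any (pvMatch lc uc)) "Shimmer" seen)),
       pvCondMod c (pvRsW.any (pvMatch lc uc)) "Wavelet/TQWT"
        (pvCondMod c (pvRsN.any (pvMatch lc uc)) "Nonlinear Dynamics"
          (pvCondMod c (pvRsS.any (pvMatch lc uc)) "Shimmer" groups))) := by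
  rw [List.foldl_append,
    pv_fold_block c lc uc "Shimmer" pvRsS (by simp [pvRsS]) seen groups hgS]
  by_cases h : pvRsS.any (pvMatch lc uc) = true
  · rw [if_pos h,
      pv_fold_NW c lc uc _ _ (by rw [pv_contains_add_ne _ _ _ (by decide)]; exact hgN)
        (by rw [pv_contains_add_ne _ _ _ (by decide)]; exact hgW)]
    simp [pvCondAdd, pvCondMod, h]
  · rw [if_neg h, pv_fold_NW c lc uc _ _ hgN hgW]
    simp [pvCondAdd, pvCondMod, h]

theorem pv_fold_JSNW (c lc uc : String) (seen : PySem.Set String)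
    (groups : PySem.Dict String (List String))
    (hgJ : PySem.Set.contains seen "Jitter" = false)
    (hgS : PySem.Set.contains seen "Shimmer" = false)
    (hgN : PySem.Set.contains seen "Nonlinear Dynamics" = false)
    (hgW : PySem.Set.contains seen "Wavelet/TQWT" = false) :
    (pvRsJ ++ (pvRsS ++ (pvRsN ++ pvRsW))).foldl (pvStep c lc uc) (seen, groups) =
      (pvCondAdd (pvRsW.any (pvMatch lc uc)) "Wavelet/TQWT"
        (pvCondAdd (pvRsN.any (pvMatch lc uc)) "Nonlinear Dynamics"
          (pvCondAdd (pvRsS.any (pvMatch lc uc)) "Shimmer"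
            (pvCondAdd (pvRsJ.any (pvMatch lc uc)) "Jitter" seen))),
       pvCondMod c (pvRsW.any (pvMatch lc uc)) "Wavelet/TQWT"
        (pvCondMod c (pvRsN.any (pvMatch lc uc)) "Nonlinear Dynamics"
          (pvCondMod c (pvRsS.any (pvMatch lc uc)) "Shimmer"
            (pvCondMod c (pvRsJ.any (pvMatch lc uc)) "Jitter" groups)))) := by
  rw [List.foldl_append,
    pv_fold_block c lc uc "Jitter" pvRsJ (by simp [pvRsJ]) seen groups hgJ]
  by_cases h : pvRsJ.any (pvMatch lc uc) = true
  · rw [if_pos h,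
      pv_fold_SNW c lc uc _ _ (by rw [pv_contains_add_ne _ _ _ (by decide)]; exact hgS)
        (by rw [pv_contains_add_ne _ _ _ (by decide)]; exact hgN)
        (by rw [pv_contains_add_ne _ _ _ (by decide)]; exact hgW)]
    simp [pvCondAdd, pvCondMod, h]
  · rw [if_neg h, pv_fold_SNW c lc uc _ _ hgS hgN hgW]
    simp [pvCondAdd, pvCondMod, h]

-- processing one column: each of the four lists gains `c` iff its predicate holds
theorem pv_col (c : String) (j s n w : List String) :
    (pvRules.foldl (pvStep c (PySem.Str.lower c) (PySem.Str.upper c))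
      (PySem.Set.empty,
       (⟨[("Jitter", j), ("Shimmer", s), ("Nonlinear Dynamics", n), ("Wavelet/TQWT", w)]⟩ :
         PySem.Dict String (List String)))).2 =
    (⟨[("Jitter", if PySem.Str.isIn "jitter" (PySem.Str.lower c) then j ++ [c] else j),
       ("Shimmer", if PySem.Str.isIn "shimmer" (PySem.Str.lower c) then s ++ [c] else s),
       ("Nonlinear Dynamics",
        if ["DFA", "RPDE", "PPE", "D2", "ENTROPY"].any (fun x => PySem.Str.isIn x (PySem.Str.upper c))
        then n ++ [c] else n),
       ("Wavelet/TQWT",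
        if ["tqwt", "wavelet", "mfcc", "delta"].any (fun x => PySem.Str.isIn x (PySem.Str.lower c))
        then w ++ [c] else w)]⟩ : PySem.Dict String (List String)) := by
  have hsplit : pvRules = pvRsJ ++ (pvRsS ++ (pvRsN ++ pvRsW)) := rfl
  rw [hsplit, pv_fold_JSNW c _ _ PySem.Set.empty _ rfl rfl rfl rfl]
  have hJeq : pvRsJ.any (pvMatch (PySem.Str.lower c) (PySem.Str.upper c)) =
      PySem.Str.isIn "jitter" (PySem.Str.lower c) := by simp [pvRsJ, pvMatch]
  have hSeq : pvRsS.any (pvMatch (PySem.Str.lower c) (PySem.Str.upper c)) =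
      PySem.Str.isIn "shimmer" (PySem.Str.lower c) := by simp [pvRsS, pvMatch]
  have hNeq : pvRsN.any (pvMatch (PySem.Str.lower c) (PySem.Str.upper c)) =
      ["DFA", "RPDE", "PPE", "D2", "ENTROPY"].any (fun x => PySem.Str.isIn x (PySem.Str.upper c)) := by
    simp [pvRsN, pvMatch]
  have hWeq : pvRsW.any (pvMatch (PySem.Str.lower c) (PySem.Str.upper c)) =
      ["tqwt", "wavelet", "mfcc", "delta"].any (fun x => PySem.Str.isIn x (PySem.Str.lower c)) := by
    simp [pvRsW, pvMatch]
  simp only [pvCondMod, hJeq, hSeq, hNeq, hWeq]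
  split_ifs <;>
    simp [PySem.Dict.modify, PySem.Dict.insert, PySem.Dict.getD, PySem.Dict.get?,
      PySem.Dict.contains]

-- the whole fold over columns, with generalized accumulator lists
theorem pv_fold_columns (columns : List String) (j s n w : List String) :
    columns.foldl (fun groups c =>
        let lc := PySem.Str.lower c
        let uc := PySem.Str.upper c
        (pvRules.foldl (pvStep c lc uc) (PySem.Set.empty, groups)).2)
      (⟨[("Jitter", j), ("Shimmer", s), ("Nonlinear Dynamics", n), ("Wavelet/TQWT", w)]⟩ :
        PySem.Dict String (List String)) =
    (⟨[("Jitter", j ++ columns.filter (fun c => PySem.Str.isIn "jitter" (PySem.Str.lower c))),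
       ("Shimmer", s ++ columns.filter (fun c => PySem.Str.isIn "shimmer" (PySem.Str.lower c))),
       ("Nonlinear Dynamics", n ++ columns.filter (fun c =>
          ["DFA", "RPDE", "PPE", "D2", "ENTROPY"].any (fun x => PySem.Str.isIn x (PySem.Str.upper c)))),
       ("Wavelet/TQWT", w ++ columns.filter (fun c =>
          ["tqwt", "wavelet", "mfcc", "delta"].any (fun x => PySem.Str.isIn x (PySem.Str.lower c))))]⟩ :
      PySem.Dict String (List String)) := by
  induction columns generalizing j s n w with
  | nil => simp
  | cons c cs ih =>
    rw [List.foldl_cons]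
    show cs.foldl _ ((pvRules.foldl (pvStep c (PySem.Str.lower c) (PySem.Str.upper c))
      (PySem.Set.empty, _)).2) = _
    rw [pv_col c j s n w, ih]
    simp only [List.filter_cons]
    split_ifs <;> simp_all

-- `lc.startswith(p)` is subsumed by `p in lc`
theorem pv_startswith_isIn (p s : String) (h : PySem.Str.startswith s p = true) :
    PySem.Str.isIn p s = true := by
  rw [PySem.Str.isIn_iff_infix]
  have := (PySem.Chars.startswith_iff s.toList p.toList).mp (by simpa using h)
  exact this.isInfix

theorem pv_pred_eq (kw s : String) :
    (PySem.Str.isIn kw (PySem.Str.lower s) || PySem.Str.startswith (PySem.Str.lower s) kw) =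
    PySem.Str.isIn kw (PySem.Str.lower s) := by
  cases hi : PySem.Str.isIn kw (PySem.Str.lower s) with
  | true => simp
  | false =>
    cases hs : PySem.Str.startswith (PySem.Str.lower s) kw with
    | false => simp
    | true =>
      have := pv_startswith_isIn kw _ hs
      rw [this] at hi
      exact absurd hi (by decide)

-- ===== VERDICT (by name: the statement is the Claim_ definition above) =====
theorem get_feature_groups_spec : Claim_equal_get_feature_groups := by
  intro columns _
  show get_feature_groups columns = get_feature_groups_alt columns
  unfold get_feature_groups get_feature_groups_alt
  have hinit : (PySem.Dict.ofList
      [("Jitter", ([] : List String)), ("Shimmer", []), ("Nonlinear Dynamics", []), ("Wavelet/TQWT", [])]) =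
      (⟨[("Jitter", []), ("Shimmer", []), ("Nonlinear Dynamics", []), ("Wavelet/TQWT", [])]⟩ :
        PySem.Dict String (List String)) := by rfl
  rw [hinit, pv_fold_columns]
  simp only [pv_pred_eq]
  simp
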